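-- pv_equiv track=rewrite | github.com/tamaroth/advent-of-code-2018 | python/days/d02/__init__.py | _has_repeated_characters_twice_or_thrice_in_string
-- ===== SOURCE A (Python) =====
-- def _has_repeated_characters_twice_or_thrice_in_string(line):
--     """Returns a tuple with the number of characters in a string that appear
--     there exactly twice and thrice.
--     """
--     d = dict.fromkeys(line, 0)
--     for c in line:
--         d[c] += 1
--     twice = False
--     thrice = False
--     for c, count in d.items():
--         if count == 2:
--             twice = True
--         elif count == 3:
--             thrice = True
--     return (twice, thrice)
-- ===== SOURCE B (Python) =====
-- def _has_repeated_characters_twice_or_thrice_in_string(line):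
--     """Returns a tuple with the number of characters in a string that appear
--     there exactly twice and thrice.
--
--     Re-implementation: sort the string and scan runs of consecutive equal
--     characters; a run's length is that character's multiplicity, so no
--     frequency dict is ever built.
--     """
--     s = sorted(line)
--     twice = False
--     thrice = False
--     i = 0
--     n = len(s)
--     while i < n:
--         j = i + 1
--         while j < n and s[j] == s[i]:
--             j += 1
--         run = j - i
--         if run == 2:
--             twice = True
--         elif run == 3:
--             thrice = True
--         i = j
--     return (twice, thrice)
-- ===== Notes on version B (the rewrite author's own statement) =====
-- stated objective: alternative
-- what changed: Replaces the frequency dict (fromkeys + increment loop + items scan) with sort-then-run-length scanning: the sorted string is traversed once and each maximal run of equal characters yields its multiplicity directly.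
import Mathlib
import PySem

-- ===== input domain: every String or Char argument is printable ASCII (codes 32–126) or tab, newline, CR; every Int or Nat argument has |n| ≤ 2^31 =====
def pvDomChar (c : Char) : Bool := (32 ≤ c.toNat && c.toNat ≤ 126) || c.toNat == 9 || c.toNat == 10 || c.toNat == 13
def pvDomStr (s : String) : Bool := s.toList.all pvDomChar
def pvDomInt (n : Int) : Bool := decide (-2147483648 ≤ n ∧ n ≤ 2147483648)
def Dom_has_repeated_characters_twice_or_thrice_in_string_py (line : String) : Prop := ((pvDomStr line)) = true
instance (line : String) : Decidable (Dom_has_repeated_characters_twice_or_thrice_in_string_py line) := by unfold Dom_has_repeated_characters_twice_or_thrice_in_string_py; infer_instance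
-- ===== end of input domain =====

-- B replaces A's frequency dict with a sort-then-run-length scan of the string; same result, different algorithm (objective: alternative).


-- ===== PORT A =====
def has_repeated_characters_twice_or_thrice_in_string_py (line : String) : Bool × Bool :=
  let chars := line.toList
  -- d = dict.fromkeys(line, 0)
  let d0 : PySem.Dict Char Int := chars.foldl (fun d c => d.insert c 0) PySem.Dict.empty
  -- for c in line: d[c] += 1   (every key is present after fromkeys, so modify with default 0 is exact)
  let d : PySem.Dict Char Int := chars.foldl (fun d c => d.modify c 0 (· + 1)) d0
  -- for c, count in d.items(): if count == 2 … elif count == 3 …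
  d.items.foldl (fun (acc : Bool × Bool) p =>
      if p.2 == 2 then (true, acc.2)
      else if p.2 == 3 then (acc.1, true)
      else acc) (false, false)

-- ===== PORT B =====
-- the outer while-loop of Source B: consume one maximal run of equal characters per step
def pvRunScan : List Char → Bool → Bool → Bool × Bool
  | [], twice, thrice => (twice, thrice)
  | c :: rest, twice, thrice =>
    -- inner while: j advances past the characters equal to s[i]
    let run : Nat := 1 + (rest.takeWhile (fun x => x == c)).length
    let rest' := rest.dropWhile (fun x => x == c)
    if run == 2 then pvRunScan rest' true thrice
    else if run == 3 then pvRunScan rest' twice true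
    else pvRunScan rest' twice thrice
termination_by s => s.length
decreasing_by
  all_goals
    simpa using Nat.lt_succ_of_le (List.length_dropWhile_le (fun x => x == c) rest)

def has_repeated_characters_twice_or_thrice_in_string_py_alt (line : String) : Bool × Bool :=
  pvRunScan (PySem.List.sorted line.toList (fun x => x) false) false false

-- ===== PRECONDITION & SPEC =====
def Spec_has_repeated_characters_twice_or_thrice_in_string_py (line : String) (out : Bool × Bool) : Prop := out = has_repeated_characters_twice_or_thrice_in_string_py_alt line
instance (line : String) (out : Bool × Bool) : Decidable (Spec_has_repeated_characters_twice_or_thrice_in_string_py line out) := by unfold Spec_has_repeated_characters_twice_or_thrice_in_string_py; infer_instance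

-- ===== CLAIM (what is proved, stated in full; the proofs are below) =====
def Claim_equal_has_repeated_characters_twice_or_thrice_in_string_py : Prop := ∀ (line : String), Dom_has_repeated_characters_twice_or_thrice_in_string_py line → Spec_has_repeated_characters_twice_or_thrice_in_string_py line (has_repeated_characters_twice_or_thrice_in_string_py line)

-- ===== LEMMAS AND PROOFS =====

-- Both sides equal this canonical value.
def pvTarget (l : List Char) : Bool × Bool :=
  (decide (∃ c ∈ l, l.count c = 2), decide (∃ c ∈ l, l.count c = 3))

theorem pvBoolEq {a b : Bool} (h : a = true ↔ b = true) : a = b := by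
  cases a <;> cases b <;> simp_all

-- ---- A side ----

theorem pvGetD_fromkeys (l : List Char) (d : PySem.Dict Char Int)
    (hd : ∀ c, d.getD c 0 = 0) :
    ∀ c, (l.foldl (fun d c => d.insert c 0) d).getD c 0 = 0 := by
  induction l generalizing d with
  | nil => simpa using hd
  | cons x xs ih =>
      intro c
      simp only [List.foldl_cons]
      exact ih _ (fun c => by rw [PySem.Dict.getD_insert]; split <;> simp [hd]) c

theorem pvItemsFold (items : List (Char × Int)) (a b : Bool) :
    items.foldl (fun (acc : Bool × Bool) p =>
        if p.2 == 2 then (true, acc.2)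
        else if p.2 == 3 then (acc.1, true)
        else acc) (a, b)
      = (a || items.any (fun p => p.2 == 2), b || items.any (fun p => p.2 == 3)) := by
  induction items generalizing a b with
  | nil => simp
  | cons p ps ih =>
      rw [List.foldl_cons]
      by_cases h2 : (p.2 == 2) = true
      · rw [if_pos h2, ih]
        have h3 : (p.2 == 3) = false := by
          simp only [beq_iff_eq] at h2; simp [h2]
        simp [List.any_cons, h2, h3]
      · have h2' : (p.2 == 2) = false := by simp_all
        rw [if_neg h2]
        by_cases h3 : (p.2 == 3) = true
        · rw [if_pos h3, ih]
          simp [List.any_cons, h2', h3]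
        · have h3' : (p.2 == 3) = false := by simp_all
          rw [if_neg h3, ih]
          simp [List.any_cons, h2', h3']

theorem pvA_eq_target (l : List Char) :
    (let d0 : PySem.Dict Char Int := l.foldl (fun d c => d.insert c 0) PySem.Dict.empty
     let d : PySem.Dict Char Int := l.foldl (fun d c => d.modify c 0 (· + 1)) d0
     d.items.foldl (fun (acc : Bool × Bool) p =>
        if p.2 == 2 then (true, acc.2)
        else if p.2 == 3 then (acc.1, true)
        else acc) (false, false)) = pvTarget l := by
  simp only []
  set d0 : PySem.Dict Char Int := l.foldl (fun d c => d.insert c 0) PySem.Dict.empty with hd0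
  set d : PySem.Dict Char Int := l.foldl (fun d c => d.modify c 0 (· + 1)) d0 with hd
  have hget0 : ∀ c, d0.getD c 0 = 0 := by
    intro c; rw [hd0]
    exact pvGetD_fromkeys l PySem.Dict.empty (fun c => by simp [PySem.Dict.getD_empty]) c
  have hget : ∀ c, d.getD c 0 = (l.count c : Int) := by
    intro c; rw [hd, PySem.Dict.getD_foldl_modify_add_one, hget0]; ring
  have hkeys0 : d0.keys = PySem.Set.ofList l := by
    rw [hd0, PySem.Dict.keys_foldl_insert (f := fun _ _ => (0 : Int))]
    simp [PySem.Dict.keys_empty, PySem.Set.update_nil_left]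
  have hkeys : d.keys = PySem.Set.ofList l := by
    rw [hd, PySem.Dict.keys_foldl_modify, hkeys0, PySem.Set.update_eq_append_filter]
    have : (PySem.Set.ofList l).filter (fun y => !(PySem.Set.contains (PySem.Set.ofList l) y)) = [] := by
      apply List.filter_eq_nil_iff.mpr
      intro x hx
      have hxl : x ∈ l := (PySem.Set.mem_ofList l x).mp hx
      simp [hxl]
    rw [this, List.append_nil]
  have hnd : d.keys.Nodup := by rw [hkeys]; exact PySem.Set.nodup_ofList l
  have hitems : d.items = (PySem.Set.ofList l).map (fun k => (k, (l.count k : Int))) := by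
    rw [PySem.Dict.items_eq_map_keys d hnd 0, hkeys]
    exact List.map_congr_left (fun k _ => by rw [hget])
  rw [hitems, pvItemsFold]
  unfold pvTarget
  refine Prod.ext ?_ ?_ <;>
  · apply pvBoolEq
    simp only [Bool.false_or, List.any_map, List.any_eq_true, Function.comp,
      PySem.Set.mem_ofList, beq_iff_eq, decide_eq_true_eq]
    constructor
    · rintro ⟨c, hc, h⟩; exact ⟨c, hc, by omega⟩
    · rintro ⟨c, hc, h⟩; exact ⟨c, hc, by omega⟩

-- ---- B side ----

theorem pvDrop_ne {c : Char} {rest : List Char}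
    (hp : (c :: rest).Pairwise (· ≤ ·)) :
    ∀ x ∈ rest.dropWhile (fun x => x == c), x ≠ c := by
  intro x hx
  have hsub : List.Sublist (rest.dropWhile (fun x => x == c)) rest :=
    List.dropWhile_sublist _
  have hple : rest.Pairwise (· ≤ ·) := hp.of_cons
  have hcle : ∀ y ∈ rest, c ≤ y := by
    intro y hy; exact List.rel_of_pairwise_cons hp hy
  cases hdw : rest.dropWhile (fun x => x == c) with
  | nil => simp [hdw] at hx
  | cons y t =>
      have hy_ne : ¬ (y == c) = true := by
        have := List.head?_dropWhile_not (fun x => x == c) rest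
        rw [hdw] at this; simpa using this
      have hcy : c < y := by
        have hymem : y ∈ rest := hsub.subset (by simp [hdw])
        exact lt_of_le_of_ne (hcle y hymem) (fun h => hy_ne (by simp [h.symm]))
      rw [hdw, List.mem_cons] at hx
      rcases hx with rfl | hx
      · exact fun h => hy_ne (by simp [h])
      · have hpyt : (y :: t).Pairwise (· ≤ ·) := by
          rw [← hdw]; exact hple.sublist hsub
        have : y ≤ x := List.rel_of_pairwise_cons hpyt hx
        exact fun h => absurd (h ▸ this) (not_le_of_gt hcy)

theorem pvTake_eq {c : Char} {rest : List Char} :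
    ∀ x ∈ rest.takeWhile (fun x => x == c), x = c := by
  intro x hx
  have := List.mem_takeWhile_imp hx
  simpa using this

theorem pvRunScan_eq (s : List Char) (hp : s.Pairwise (· ≤ ·)) (t h : Bool) :
    pvRunScan s t h
      = (t || s.any (fun c => s.count c == 2), h || s.any (fun c => s.count c == 3)) := by
  match s with
  | [] => simp [pvRunScan]
  | c :: rest =>
    have htd : rest.takeWhile (fun x => x == c) ++ rest.dropWhile (fun x => x == c) = rest :=
      List.takeWhile_append_dropWhile
    set take := rest.takeWhile (fun x => x == c) with htake
    set drop := rest.dropWhile (fun x => x == c) with hdrop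
    have hdne : ∀ x ∈ drop, x ≠ c := pvDrop_ne hp
    have hcount_c : (c :: rest).count c = 1 + take.length := by
      have h1 : take.count c = take.length :=
        List.count_eq_length.mpr (fun b hb => (pvTake_eq b hb).symm)
      have h2 : drop.count c = 0 :=
        List.count_eq_zero.mpr (fun hc => hdne c hc rfl)
      rw [List.count_cons_self, ← htd, List.count_append, h1, h2]
      omega
    have hcount_d : ∀ x ∈ drop, (c :: rest).count x = drop.count x := by
      intro x hx
      have hxc : x ≠ c := hdne x hx
      have h1 : take.count x = 0 :=
        List.count_eq_zero.mpr (fun hc => hxc (pvTake_eq x hc))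
      have h0 : (c :: rest).count x = rest.count x := by
        have hcx : ¬ c = x := fun e => hxc e.symm
        simp [hcx]
      rw [h0, ← htd, List.count_append, h1]
      omega
    have hps : drop.Pairwise (· ≤ ·) :=
      hp.of_cons.sublist (List.dropWhile_sublist _)
    have hlt : drop.length < (c :: rest).length := by
      have := List.length_dropWhile_le (fun x => x == c) rest
      simp only [← hdrop] at this
      simp [Nat.lt_succ_of_le this]
    have ih := pvRunScan_eq drop hps
    have hany : ∀ n : Nat,
        (c :: rest).any (fun x => (c :: rest).count x == n)
          = (((c :: rest).count c == n) || drop.any (fun x => drop.count x == n)) := by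
      intro n
      apply pvBoolEq
      simp only [Bool.or_eq_true, List.any_eq_true, beq_iff_eq]
      constructor
      · rintro ⟨x, hx, hcx⟩
        rw [List.mem_cons] at hx
        rcases hx with rfl | hx
        · exact Or.inl hcx
        · rw [← htd, List.mem_append] at hx
          rcases hx with hx | hx
          · rw [pvTake_eq x hx] at hcx; exact Or.inl hcx
          · exact Or.inr ⟨x, hx, by rw [← hcount_d x hx]; exact hcx⟩
      · rintro (hc | ⟨x, hx, hcx⟩)
        · exact ⟨c, by simp, hc⟩
        · refine ⟨x, ?_, by rw [hcount_d x hx]; exact hcx⟩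
          have hxr : x ∈ rest := by rw [← htd]; exact List.mem_append_right _ hx
          exact List.mem_cons_of_mem _ hxr
    rw [pvRunScan]
    simp only [← htake, ← hdrop]
    rw [hany 2, hany 3]
    simp only [ih]
    have e2 : (1 + take.length == 2) = ((c :: rest).count c == 2) := by rw [hcount_c]
    have e3 : (1 + take.length == 3) = ((c :: rest).count c == 3) := by rw [hcount_c]
    rw [e2, e3]
    by_cases h2 : (c :: rest).count c = 2
    · have b2 : ((c :: rest).count c == 2) = true := beq_iff_eq.mpr h2
      have b3 : ((c :: rest).count c == 3) = false := beq_eq_false_iff_ne.mpr (by omega)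
      rw [b2, b3]; simp
    · have b2 : ((c :: rest).count c == 2) = false := beq_eq_false_iff_ne.mpr h2
      rw [b2]
      by_cases h3 : (c :: rest).count c = 3
      · have b3 : ((c :: rest).count c == 3) = true := beq_iff_eq.mpr h3
        rw [b3]; simp
      · have b3 : ((c :: rest).count c == 3) = false := beq_eq_false_iff_ne.mpr h3
        rw [b3]; simp
termination_by s.length
decreasing_by simpa using hlt

theorem pvB_eq_target (l : List Char) :
    pvRunScan (PySem.List.sorted l (fun x => x) false) false false = pvTarget l := by
  set s := PySem.List.sorted l (fun x => x) false with hs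
  have hperm : s.Perm l := PySem.List.sorted_perm l (fun x => x) false
  have hp : s.Pairwise (· ≤ ·) := by
    simpa using PySem.List.sorted_pairwise (xs := l) (key := fun x => x)
  rw [pvRunScan_eq s hp]
  unfold pvTarget
  refine Prod.ext ?_ ?_ <;>
  · apply pvBoolEq
    simp only [Bool.false_or, List.any_eq_true, beq_iff_eq, decide_eq_true_eq]
    constructor
    · rintro ⟨c, hc, h⟩
      exact ⟨c, hperm.mem_iff.mp hc, by rw [← hperm.count_eq]; exact h⟩
    · rintro ⟨c, hc, h⟩
      exact ⟨c, hperm.mem_iff.mpr hc, by rw [hperm.count_eq]; exact h⟩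

-- ===== VERDICT (by name: the statement is the Claim_ definition above) =====
theorem has_repeated_characters_twice_or_thrice_in_string_py_spec : Claim_equal_has_repeated_characters_twice_or_thrice_in_string_py := by
  intro line _
  show _ = _
  unfold has_repeated_characters_twice_or_thrice_in_string_py has_repeated_characters_twice_or_thrice_in_string_py_alt
  rw [pvA_eq_target, pvB_eq_target]
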